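-- pv_equiv track=rewrite | github.com/joysarkar077/Algorithms-CSE221-BRACU | assets/BRACU_CSE221_LabAssignment_06_Fall2023/Task 3/task3.py | friendCircleSize
-- ===== SOURCE A (Python) =====
-- class UnionFind:
--     def __init__(self, n):
--         self.parent = list(range(n))
--         self.size = [1] * n
--
--     def find(self, x):
--         if self.parent[x] != x:
--             self.parent[x] = self.find(self.parent[x])
--         return self.parent[x]
--
--     def union(self, x, y):
--         parent_x = self.find(x)
--         parent_y = self.find(y)
--         if parent_x != parent_y:
--             if self.size[parent_x] < self.size[parent_y]:
--                 parent_x, parent_y = parent_y, parent_x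
--             self.parent[parent_y] = parent_x
--             self.size[parent_x] += self.size[parent_y]
--
-- def friendCircleSize(N, queries):
--     uf = UnionFind(N)
--     result = []
--
--     for query in queries:
--         a, b = query
--         uf.union(a - 1, b - 1)
--         result.append(uf.size[uf.find(a - 1)])
--
--     return result
-- ===== SOURCE B (Python) =====
-- def friendCircleSize(N, queries):
--     comp = list(range(N))
--     members = [[i] for i in range(N)]
--     out = []
--     for a, b in queries:
--         la, lb = comp[a - 1], comp[b - 1]
--         if la != lb:
--             if len(members[la]) < len(members[lb]):
--                 la, lb = lb, la
--             for x in members[lb]: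
--                 comp[x] = la
--             members[la].extend(members[lb])
--             members[lb] = []
--         out.append(len(members[comp[a - 1]]))
--     return out
-- ===== Notes on version B (the rewrite author's own statement) =====
-- stated objective: alternative
-- what changed: Replaces the recursive path-compressing union-find forest with an explicit small-to-large label merge: comp maps each node to a group label and members lists each group's nodes, so a merge relabels the smaller group's nodes directly - no parent pointers, no recursion, no find.
import Mathlib
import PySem

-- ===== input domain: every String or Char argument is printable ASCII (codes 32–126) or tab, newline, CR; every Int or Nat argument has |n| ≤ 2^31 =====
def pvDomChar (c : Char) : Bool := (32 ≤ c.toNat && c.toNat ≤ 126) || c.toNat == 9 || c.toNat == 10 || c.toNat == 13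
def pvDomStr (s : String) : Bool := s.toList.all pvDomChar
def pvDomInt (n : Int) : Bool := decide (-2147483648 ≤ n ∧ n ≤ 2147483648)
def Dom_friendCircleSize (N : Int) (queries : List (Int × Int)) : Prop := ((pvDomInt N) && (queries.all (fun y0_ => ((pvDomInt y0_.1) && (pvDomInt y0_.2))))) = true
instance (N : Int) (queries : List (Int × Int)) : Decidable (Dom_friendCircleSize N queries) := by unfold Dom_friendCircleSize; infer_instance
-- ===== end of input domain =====

-- B replaces A's recursive path-compressing union-find with a small-to-large label merge
-- (comp labels plus explicit member lists); an alternative data structure with the same return values on Pre_.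


-- ===== PORT A =====
def ufFind (p : List Int) (x : Int) (fuel : Nat) : List Int × Int :=
  match fuel with
  | 0 => (p, x)
  | Nat.succ f =>
    let px := PySem.List.pyGetD p x 0
    if px = x then (p, x)
    else
      let pr := ufFind p px f
      (PySem.List.pySetD pr.1 x pr.2, pr.2)

def ufUnion (p s : List Int) (x y : Int) (fuel : Nat) : List Int × List Int :=
  let f1 := ufFind p x fuel
  let f2 := ufFind f1.1 y fuel
  if f1.2 ≠ f2.2 then
    let pq := if PySem.List.pyGetD s f1.2 0 < PySem.List.pyGetD s f2.2 0 then (f2.2, f1.2) else (f1.2, f2.2)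
    (PySem.List.pySetD f2.1 pq.2 pq.1,
     PySem.List.pySetD s pq.1 (PySem.List.pyGetD s pq.1 0 + PySem.List.pyGetD s pq.2 0))
  else (f2.1, s)

def ufStep (F : Nat) (st : (List Int × List Int) × List Int) (q : Int × Int) :
    (List Int × List Int) × List Int :=
  let ps := ufUnion st.1.1 st.1.2 (q.1 - 1) (q.2 - 1) F
  let fr := ufFind ps.1 (q.1 - 1) F
  ((fr.1, ps.2), st.2 ++ [PySem.List.pyGetD ps.2 fr.2 0])


def friendCircleSize (N : Int) (queries : List (Int × Int)) : List Int :=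
  (queries.foldl (ufStep (N.toNat + queries.length))
    ((PySem.List.pyRange 0 N 1, List.replicate N.toNat 1), [])).2

-- ===== PORT B =====
def altStep (st : (List Int × List (List Int)) × List Int) (q : Int × Int) :
    (List Int × List (List Int)) × List Int :=
  let c := st.1.1
  let mem := st.1.2
  let la := PySem.List.pyGetD c (q.1 - 1) 0
  let lb := PySem.List.pyGetD c (q.2 - 1) 0
  let st1 :=
    if la ≠ lb then
      let ll := if (PySem.List.pyGetD mem la ([] : List Int)).length <
                   (PySem.List.pyGetD mem lb ([] : List Int)).length then (lb, la) else (la, lb)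
      let small := PySem.List.pyGetD mem ll.2 ([] : List Int)
      let c' := small.foldl (fun cc t => PySem.List.pySetD cc t ll.1) c
      let mem' := PySem.List.pySetD
          (PySem.List.pySetD mem ll.1 (PySem.List.pyGetD mem ll.1 ([] : List Int) ++ small))
          ll.2 ([] : List Int)
      (c', mem')
    else (c, mem)
  (st1, st.2 ++ [((PySem.List.pyGetD st1.2 (PySem.List.pyGetD st1.1 (q.1 - 1) 0) ([] : List Int)).length : Int)])

def friendCircleSize_alt (N : Int) (queries : List (Int × Int)) : List Int :=
  (queries.foldl altStep
    ((PySem.List.pyRange 0 N 1, (PySem.List.pyRange 0 N 1).map (fun i => [i])), [])).2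

-- ===== PRECONDITION & SPEC =====
-- Pre_ admits exactly the queries whose Python indices a-1, b-1 fall inside list range
-- [-N, N-1] (including Python's negative-index wraparound); outside it A raises IndexError.
def Pre_friendCircleSize (N : Int) (queries : List (Int × Int)) : Prop :=
  ∀ q ∈ queries, 1 - N ≤ q.1 ∧ q.1 ≤ N ∧ 1 - N ≤ q.2 ∧ q.2 ≤ N
instance (N : Int) (queries : List (Int × Int)) : Decidable (Pre_friendCircleSize N queries) := by
  unfold Pre_friendCircleSize; infer_instance

def pvWitness_friendCircleSize : Int × (List (Int × Int)) := (3, [(1, 2), (2, 3)])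

def Spec_friendCircleSize (N : Int) (queries : List (Int × Int)) (out : List Int) : Prop := out = friendCircleSize_alt N queries
instance (N : Int) (queries : List (Int × Int)) (out : List Int) : Decidable (Spec_friendCircleSize N queries out) := by unfold Spec_friendCircleSize; infer_instance

-- ===== CLAIM (what is proved, stated in full; the proofs are below) =====
def Claim_equal_friendCircleSize : Prop := ∀ (N : Int) (queries : List (Int × Int)), Dom_friendCircleSize N queries → Pre_friendCircleSize N queries → Spec_friendCircleSize N queries (friendCircleSize N queries)

-- ===== LEMMAS AND PROOFS =====
def pg (p : List Int) (x : Int) : Int := PySem.List.pyGetD p x 0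
def mg (mem : List (List Int)) (l : Int) : List Int := PySem.List.pyGetD mem l ([] : List Int)
def iterP (p : List Int) : Nat → Int → Int
  | 0, x => x
  | f + 1, x => iterP p f (pg p x)
def Hgt (n : Nat) (p : List Int) (h : Int → Nat) : Prop :=
  ∀ x : Int, 0 ≤ x → x < n → (pg p x = x → h x = 0) ∧ (pg p x ≠ x → h (pg p x) < h x)
def Rng (n : Nat) (p : List Int) : Prop :=
  ∀ x : Int, 0 ≤ x → x < n → 0 ≤ pg p x ∧ pg p x < n
def R2 (n : Nat) (p c : List Int) : Prop :=
  ∀ x : Int, 0 ≤ x → x < n → pg c (pg p x) = pg c x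
def R3 (n : Nat) (p c : List Int) : Prop :=
  ∀ x y : Int, 0 ≤ x → x < n → 0 ≤ y → y < n →
    pg p x = x → pg p y = y → pg c x = pg c y → x = y
def MA (n : Nat) (c : List Int) (mem : List (List Int)) : Prop :=
  ∀ i : Int, 0 ≤ i → i < n → i ∈ mg mem (pg c i)
def MB (n : Nat) (c : List Int) (mem : List (List Int)) : Prop :=
  ∀ l : Int, 0 ≤ l → l < n → ∀ x ∈ mg mem l, (0 ≤ x ∧ x < n) ∧ pg c x = l
def R4 (n : Nat) (p s c : List Int) (mem : List (List Int)) : Prop :=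
  ∀ r : Int, 0 ≤ r → r < n → pg p r = r → pg s r = ((mg mem (pg c r)).length : Int)
def UFInv (n k : Nat) (p s c : List Int) (mem : List (List Int)) : Prop :=
  p.length = n ∧ s.length = n ∧ c.length = n ∧ mem.length = n ∧
  Rng n p ∧ Rng n c ∧
  (∃ h : Int → Nat, Hgt n p h ∧ ∀ x : Int, 0 ≤ x → x < n → h x ≤ k) ∧
  R2 n p c ∧ R3 n p c ∧ MA n c mem ∧ MB n c mem ∧ R4 n p s c mem

theorem getD_setD {α : Type} (xs : List α) (i j : Int) (v d : α)
    (hi0 : 0 ≤ i) (hj0 : 0 ≤ j) (hj : j < xs.length) :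
    PySem.List.pyGetD (PySem.List.pySetD xs i v) j d = if j = i then v else PySem.List.pyGetD xs j d := by
  rw [PySem.List.pySetD_of_nonneg _ v hi0]
  rw [PySem.List.pyGetD_eq_getElem _ d hj0 (by simpa using hj),
      PySem.List.pyGetD_eq_getElem _ d hj0 (by simpa using hj)]
  rw [List.getElem_set]
  split_ifs with h1 h2 h3
  · rfl
  · omega
  · omega
  · rfl

theorem iter_of_root (p : List Int) (f : Nat) (x : Int) (hx : pg p x = x) :
    iterP p f x = x := by
  induction f with
  | zero => rfl
  | succ f ih => simp [iterP, hx, ih]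

theorem iter_succ_of_le (n : Nat) (p : List Int) (h : Int → Nat)
    (hR : Rng n p) (hH : Hgt n p h) :
    ∀ (f : Nat) (w : Int), 0 ≤ w → w < n → h w ≤ f → iterP p (f + 1) w = iterP p f w := by
  intro f
  induction f with
  | zero =>
    intro w h0 h1 hle
    have hroot : pg p w = w := by
      by_contra hc
      have := (hH w h0 h1).2 hc
      omega
    simp [iterP, hroot]
  | succ f ih =>
    intro w h0 h1 hle
    by_cases hroot : pg p w = w
    · rw [iter_of_root _ _ _ hroot, iter_of_root _ _ _ hroot]
    · have hr := hR w h0 h1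
      have hlt := (hH w h0 h1).2 hroot
      show iterP p (f + 1) (pg p w) = iterP p f (pg p w)
      exact ih (pg p w) hr.1 hr.2 (by omega)

theorem relabel_pw (la : Int) :
    ∀ (L : List Int) (c : List Int), (∀ t ∈ L, 0 ≤ t ∧ t < c.length) →
    (L.foldl (fun cc t => PySem.List.pySetD cc t la) c).length = c.length ∧
    ∀ i : Int, 0 ≤ i → i < c.length →
      pg (L.foldl (fun cc t => PySem.List.pySetD cc t la) c) i = if i ∈ L then la else pg c i := by
  intro L
  induction L with
  | nil => intro c _; exact ⟨rfl, by simp⟩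
  | cons t L ih =>
    intro c hL
    have ht := hL t (List.mem_cons_self ..)
    have hset : (PySem.List.pySetD c t la).length = c.length := PySem.List.length_pySetD c t la
    obtain ⟨ihlen, ihpw⟩ := ih (PySem.List.pySetD c t la)
      (fun u hu => by rw [hset]; exact hL u (List.mem_cons_of_mem _ hu))
    refine ⟨by simp [List.foldl_cons, ihlen, hset], ?_⟩
    intro i hi0 hi1
    rw [List.foldl_cons, ihpw i hi0 (by rw [hset]; exact hi1)]
    by_cases hiL : i ∈ L
    · simp [hiL]
    · have : pg (PySem.List.pySetD c t la) i = if i = t then la else pg c i :=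
        getD_setD c t i la 0 ht.1 hi0 hi1
      simp only [hiL, if_false, this]
      by_cases hit : i = t <;> simp [hit, hiL]

theorem pyIdx_wrap (n : Nat) (x : Int)
    (h1 : -(n : Int) ≤ x) (h2 : x < 0) :
    PySem.List.pyIdx? n x = some (x + n).toNat := by
  unfold PySem.List.pyIdx?
  rw [if_neg (by omega), if_pos (by omega)]
  congr 1
  omega

theorem setD_wrap {α : Type} (xs : List α) (x : Int) (v : α)
    (h1 : -(xs.length : Int) ≤ x) (h2 : x < 0) :
    PySem.List.pySetD xs x v = xs.set (x + xs.length).toNat v := by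
  simp [PySem.List.pySetD, PySem.List.pySet?, pyIdx_wrap xs.length x h1 h2]

theorem getD_wrap {α : Type} (xs : List α) (x : Int) (d : α)
    (h1 : -(xs.length : Int) ≤ x) (h2 : x < 0) :
    PySem.List.pyGetD xs x d = PySem.List.pyGetD xs (x + xs.length) d := by
  rw [PySem.List.pyGetD_of_nonneg xs d (show (0 : Int) ≤ x + xs.length by omega)]
  simp [PySem.List.pyGetD, PySem.List.pyGet?, pyIdx_wrap xs.length x h1 h2]

theorem find_len : ∀ (F : Nat) (p : List Int) (x : Int), (ufFind p x F).1.length = p.length := by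
  intro F
  induction F with
  | zero => intro p x; rfl
  | succ F ih =>
    intro p x
    show (if PySem.List.pyGetD p x 0 = x then (p, x) else _).1.length = _
    split_ifs with h
    · rfl
    · show (PySem.List.pySetD (ufFind p (PySem.List.pyGetD p x 0) F).1 x
        (ufFind p (PySem.List.pyGetD p x 0) F).2).length = _
      rw [PySem.List.length_pySetD, ih]

theorem find_entry_wrap (n : Nat) (F : Nat) (p : List Int) (x : Int)
    (hlen : p.length = n) (hRp : Rng n p)
    (hx0 : -(n : Int) ≤ x) (hx1 : x < 0) :
    ufFind p x (F + 1) = ufFind p (x + n) (F + 1) := by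
  set x' := x + (n : Int) with hx'_def
  have hxl : -(p.length : Int) ≤ x := by rw [hlen]; exact_mod_cast hx0
  have hget' : PySem.List.pyGetD p x 0 = PySem.List.pyGetD p x' 0 := by
    rw [getD_wrap p x 0 hxl hx1, hlen]
  have hpxr := hRp x' (by omega) (by omega)
  have hne : PySem.List.pyGetD p x 0 ≠ x := by
    rw [hget']
    intro he
    have : pg p x' = x := he
    omega
  by_cases hroot : PySem.List.pyGetD p x' 0 = x'
  · have hdir : ufFind p x' (F + 1) = (p, x') := by simp [ufFind, hroot]
    have hrec : ufFind p (PySem.List.pyGetD p x 0) F = (p, x') := by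
      rw [hget', hroot]
      cases F with
      | zero => rfl
      | succ f => simp [ufFind, hroot]
    have hthis : ufFind p x (F + 1) = (PySem.List.pySetD p x x', x') := by
      show (if PySem.List.pyGetD p x 0 = x then (p, x) else _) = _
      rw [if_neg hne]
      show (PySem.List.pySetD (ufFind p (PySem.List.pyGetD p x 0) F).1 x
        (ufFind p (PySem.List.pyGetD p x 0) F).2, _) = _
      rw [hrec]
    rw [hthis, hdir]
    have hnn : (x + (p.length : Int)).toNat < p.length := by omega
    have hgx : p[(x + (p.length : Int)).toNat] = x' := by
      have := PySem.List.pyGetD_eq_getElem p (0 : Int) (show (0:Int) ≤ x' by omega)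
        (show x' < (p.length : Int) by omega)
      rw [this] at hroot
      have h2 : (x + (p.length : Int)).toNat = x'.toNat := by omega
      simp only [h2]
      exact hroot
    refine Prod.ext ?_ rfl
    show PySem.List.pySetD p x x' = p
    rw [setD_wrap p x x' hxl hx1, ← hgx]
    exact List.set_getElem_self hnn
  · have hne' : PySem.List.pyGetD p x' 0 ≠ x' := hroot
    have hdir : ufFind p x' (F + 1) =
        (PySem.List.pySetD (ufFind p (PySem.List.pyGetD p x' 0) F).1 x'
          (ufFind p (PySem.List.pyGetD p x' 0) F).2,
         (ufFind p (PySem.List.pyGetD p x' 0) F).2) := by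
      show (if PySem.List.pyGetD p x' 0 = x' then (p, x') else _) = _
      rw [if_neg hne']
    have hthis : ufFind p x (F + 1) =
        (PySem.List.pySetD (ufFind p (PySem.List.pyGetD p x' 0) F).1 x
          (ufFind p (PySem.List.pyGetD p x' 0) F).2,
         (ufFind p (PySem.List.pyGetD p x' 0) F).2) := by
      show (if PySem.List.pyGetD p x 0 = x then (p, x) else _) = _
      rw [if_neg hne]
      rw [hget']
    rw [hthis, hdir]
    refine Prod.ext ?_ rfl
    show PySem.List.pySetD _ x _ = PySem.List.pySetD _ x' _
    have hql : (ufFind p (PySem.List.pyGetD p x' 0) F).1.length = p.length := find_len F _ _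
    rw [setD_wrap _ x _ (by rw [hql]; exact hxl) hx1,
        PySem.List.pySetD_of_nonneg _ _ (show (0:Int) ≤ x' by omega)]
    congr 1
    rw [hql]
    omega

theorem find_spec (n : Nat) (c : List Int) (h : Int → Nat) :
    ∀ (f : Nat) (p : List Int) (x : Int),
    p.length = n → Rng n p → Hgt n p h → R2 n p c →
    0 ≤ x → x < n → h x ≤ f →
    (ufFind p x f).1.length = n ∧
    Rng n (ufFind p x f).1 ∧ Hgt n (ufFind p x f).1 h ∧ R2 n (ufFind p x f).1 c ∧
    (0 ≤ (ufFind p x f).2 ∧ (ufFind p x f).2 < n) ∧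
    pg (ufFind p x f).1 (ufFind p x f).2 = (ufFind p x f).2 ∧
    pg p (ufFind p x f).2 = (ufFind p x f).2 ∧
    pg c (ufFind p x f).2 = pg c x ∧
    (∀ z : Int, 0 ≤ z → z < n → (pg (ufFind p x f).1 z = z ↔ pg p z = z)) := by
  intro f
  induction f with
  | zero =>
    intro p x hlen hR hH hR2 hx0 hx1 hf
    have hroot : pg p x = x := by
      by_contra hc
      have := (hH x hx0 hx1).2 hc
      omega
    refine ⟨hlen, hR, hH, hR2, ⟨hx0, hx1⟩, hroot, hroot, rfl, fun z _ _ => Iff.rfl⟩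
  | succ f ih =>
    intro p x hlen hR hH hR2 hx0 hx1 hf
    by_cases hroot : PySem.List.pyGetD p x 0 = x
    · have : ufFind p x (f + 1) = (p, x) := by simp [ufFind, hroot]
      rw [this]
      exact ⟨hlen, hR, hH, hR2, ⟨hx0, hx1⟩, hroot, hroot, rfl, fun z _ _ => Iff.rfl⟩
    · have hpx := hR x hx0 hx1
      have hlt := (hH x hx0 hx1).2 hroot
      have hfind : ufFind p x (f + 1) =
          (PySem.List.pySetD (ufFind p (pg p x) f).1 x (ufFind p (pg p x) f).2,
           (ufFind p (pg p x) f).2) := by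
        simp [ufFind, hroot]
        exact ⟨rfl, rfl⟩
      obtain ⟨ilen, iR, iH, iR2, irng, irt, irtp, icomp, iiff⟩ :=
        ih p (pg p x) hlen hR hH hR2 hpx.1 hpx.2 (by omega)
      set p1 := (ufFind p (pg p x) f).1 with hp1
      set r := (ufFind p (pg p x) f).2 with hr
      rw [hfind]
      have hgset : ∀ z : Int, 0 ≤ z → z < n →
          pg (PySem.List.pySetD p1 x r) z = if z = x then r else pg p1 z := by
        intro z hz0 hz1
        exact getD_setD p1 x z r 0 hx0 hz0 (by rw [ilen]; exact hz1)
      have hrx : r ≠ x := fun he => hroot ((iiff x hx0 hx1).mp (he ▸ irt))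
      constructor
      · simpa [PySem.List.length_pySetD] using ilen
      constructor
      · intro z hz0 hz1
        rw [hgset z hz0 hz1]
        split_ifs
        · exact irng
        · exact iR z hz0 hz1
      constructor
      · intro z hz0 hz1
        rw [hgset z hz0 hz1]
        split_ifs with hzx
        · constructor
          · intro he; exact absurd (he.trans hzx) hrx
          · intro _
            have hr0 : h r = 0 := (iH r irng.1 irng.2).1 irt
            have hz1' : h (pg p z) < h z := (hH z hz0 hz1).2 (by rw [hzx]; exact hroot)
            rw [hzx]
            omega
        · exact iH z hz0 hz1
      constructor
      · intro z hz0 hz1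
        rw [hgset z hz0 hz1]
        split_ifs with hzx
        · rw [icomp, hzx]
          exact hR2 x hx0 hx1
        · exact iR2 z hz0 hz1
      refine ⟨irng, ?_, ?_, ?_, ?_⟩
      · rw [hgset r irng.1 irng.2]
        simp [hrx, irt]
      · exact (iiff r irng.1 irng.2).mp irt
      · rw [icomp]; exact hR2 x hx0 hx1
      · intro z hz0 hz1
        rw [hgset z hz0 hz1]
        split_ifs with hzx
        · constructor
          · intro he; exact absurd (he.trans hzx) hrx
          · intro he; rw [hzx] at he; exact absurd he hroot
        · exact iiff z hz0 hz1

theorem merge_core (n k F : Nat) (p2 s c : List Int) (mem : List (List Int)) (h : Int → Nat)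
    (u v : Int)
    (hlp : p2.length = n) (hls : s.length = n) (hlc : c.length = n) (hlm : mem.length = n)
    (hRp : Rng n p2) (hRc : Rng n c)
    (hH : Hgt n p2 h) (hhb : ∀ x : Int, 0 ≤ x → x < n → h x ≤ k)
    (hkF : k + 1 ≤ F)
    (hR2 : R2 n p2 c) (hR3 : R3 n p2 c) (hMA : MA n c mem) (hMB : MB n c mem)
    (hR4 : R4 n p2 s c mem)
    (hu0 : 0 ≤ u) (hu1 : u < n) (hv0 : 0 ≤ v) (hv1 : v < n)
    (huv : u ≠ v) (hru : pg p2 u = u) (hrv : pg p2 v = v) :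
    UFInv n (k + 1) (PySem.List.pySetD p2 v u)
      (PySem.List.pySetD s u (pg s u + pg s v))
      ((mg mem (pg c v)).foldl (fun cc t => PySem.List.pySetD cc t (pg c u)) c)
      (PySem.List.pySetD (PySem.List.pySetD mem (pg c u) (mg mem (pg c u) ++ mg mem (pg c v)))
        (pg c v) ([] : List Int)) := by
  have hla0 : 0 ≤ pg c u := (hRc u hu0 hu1).1
  have hla1 : pg c u < n := (hRc u hu0 hu1).2
  have hlb0 : 0 ≤ pg c v := (hRc v hv0 hv1).1
  have hlb1 : pg c v < n := (hRc v hv0 hv1).2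
  set la := pg c u with hla_def
  set lb := pg c v with hlb_def
  have hlab : la ≠ lb := fun he => huv (hR3 u v hu0 hu1 hv0 hv1 hru hrv he)
  have hmemchar : ∀ i : Int, 0 ≤ i → i < n → (i ∈ mg mem lb ↔ pg c i = lb) := by
    intro i hi0 hi1
    constructor
    · intro hm; exact (hMB lb hlb0 hlb1 i hm).2
    · intro hc; rw [← hc]; exact hMA i hi0 hi1
  obtain ⟨hlen3, hpw⟩ := relabel_pw la (mg mem lb) c (by
    intro t ht
    have := hMB lb hlb0 hlb1 t ht
    exact ⟨this.1.1, by rw [hlc]; exact this.1.2⟩)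
  set c3 := (mg mem lb).foldl (fun cc t => PySem.List.pySetD cc t la) c with hc3_def
  have hlc3 : c3.length = n := by rw [hlen3, hlc]
  have hc3 : ∀ i : Int, 0 ≤ i → i < n → pg c3 i = if pg c i = lb then la else pg c i := by
    intro i hi0 hi1
    rw [hpw i hi0 (by rw [hlc]; exact hi1)]
    by_cases hm : i ∈ mg mem lb
    · rw [if_pos hm, if_pos ((hmemchar i hi0 hi1).mp hm)]
    · rw [if_neg hm, if_neg (fun hc => hm ((hmemchar i hi0 hi1).mpr hc))]
  set mem3 := PySem.List.pySetD (PySem.List.pySetD mem la (mg mem la ++ mg mem lb)) lb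
      ([] : List Int) with hmem3_def
  have hlm1 : (PySem.List.pySetD mem la (mg mem la ++ mg mem lb)).length = n := by
    rw [PySem.List.length_pySetD, hlm]
  have hlm3 : mem3.length = n := by rw [hmem3_def, PySem.List.length_pySetD, hlm1]
  have hmem3 : ∀ l : Int, 0 ≤ l → l < n →
      mg mem3 l = if l = lb then [] else if l = la then mg mem la ++ mg mem lb else mg mem l := by
    intro l hl0 hl1
    show PySem.List.pyGetD mem3 l ([] : List Int) = _
    rw [hmem3_def]
    show PySem.List.pyGetD _ l _ = _
    rw [getD_setD _ lb l _ _ hlb0 hl0 (by rw [hlm1]; exact hl1)]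
    by_cases h1 : l = lb
    · rw [if_pos h1, if_pos h1]
    · rw [if_neg h1, if_neg h1, getD_setD _ la l _ _ hla0 hl0 (by rw [hlm]; exact hl1)]
      rfl
  set p3 := PySem.List.pySetD p2 v u with hp3_def
  set s3 := PySem.List.pySetD s u (pg s u + pg s v) with hs3_def
  have hlp3 : p3.length = n := by rw [hp3_def, PySem.List.length_pySetD, hlp]
  have hls3 : s3.length = n := by rw [hs3_def, PySem.List.length_pySetD, hls]
  have hp3 : ∀ z : Int, 0 ≤ z → z < n → pg p3 z = if z = v then u else pg p2 z := by
    intro z hz0 hz1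
    exact getD_setD p2 v z u 0 hv0 hz0 (by rw [hlp]; exact hz1)
  have hs3g : ∀ z : Int, 0 ≤ z → z < n → pg s3 z = if z = u then pg s u + pg s v else pg s z := by
    intro z hz0 hz1
    exact getD_setD s u z _ 0 hu0 hz0 (by rw [hls]; exact hz1)
  have hroots3 : ∀ z : Int, 0 ≤ z → z < n → (pg p3 z = z ↔ (pg p2 z = z ∧ z ≠ v)) := by
    intro z hz0 hz1
    rw [hp3 z hz0 hz1]
    split_ifs with hzv
    · subst hzv
      constructor
      · intro he; exact absurd he huv
      · intro ⟨_, hzz⟩; exact absurd rfl hzz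
    · exact ⟨fun he => ⟨he, hzv⟩, fun he => he.1⟩
  have hiterstep : ∀ z : Int, 0 ≤ z → z < n → pg p2 z ≠ z →
      iterP p2 F z = iterP p2 F (pg p2 z) := by
    intro z hz0 hz1 hnr
    obtain ⟨F', rfl⟩ : ∃ F', F = F' + 1 := ⟨F - 1, by omega⟩
    show iterP p2 F' (pg p2 z) = iterP p2 (F' + 1) (pg p2 z)
    refine (iter_succ_of_le n p2 h hRp hH F' (pg p2 z) (hRp z hz0 hz1).1 (hRp z hz0 hz1).2 ?_).symm
    have := (hH z hz0 hz1).2 hnr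
    have := hhb z hz0 hz1
    omega
  refine ⟨hlp3, hls3, hlc3, hlm3, ?_, ?_, ?_, ?_, ?_, ?_, ?_, ?_⟩
  · -- Rng p3
    intro z hz0 hz1
    rw [hp3 z hz0 hz1]
    split_ifs
    · exact ⟨hu0, hu1⟩
    · exact hRp z hz0 hz1
  · -- Rng c3
    intro z hz0 hz1
    rw [hc3 z hz0 hz1]
    split_ifs
    · exact ⟨hla0, hla1⟩
    · exact hRc z hz0 hz1
  · -- Hgt with new h'
    refine ⟨fun z => if iterP p2 F z = v then h z + 1 else h z, ?_, ?_⟩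
    · intro z hz0 hz1
      by_cases hzv : z = v
      · rw [hp3 z hz0 hz1, if_pos hzv]
        constructor
        · intro he; exact absurd (he.trans hzv) huv
        · intro _
          show (if iterP p2 F u = v then h u + 1 else h u) <
               (if iterP p2 F z = v then h z + 1 else h z)
          rw [iter_of_root p2 F u hru, if_neg huv, hzv, iter_of_root p2 F v hrv, if_pos rfl]
          have : h u = 0 := (hH u hu0 hu1).1 hru
          omega
      · rw [hp3 z hz0 hz1, if_neg hzv]
        constructor
        · intro he
          show (if iterP p2 F z = v then h z + 1 else h z) = 0
          rw [iter_of_root p2 F z he, if_neg hzv]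
          exact (hH z hz0 hz1).1 he
        · intro hne
          show (if iterP p2 F (pg p2 z) = v then h (pg p2 z) + 1 else h (pg p2 z)) <
               (if iterP p2 F z = v then h z + 1 else h z)
          rw [← hiterstep z hz0 hz1 hne]
          have := (hH z hz0 hz1).2 hne
          split_ifs <;> omega
    · intro z hz0 hz1
      have := hhb z hz0 hz1
      show (if iterP p2 F z = v then h z + 1 else h z) ≤ k + 1
      split_ifs <;> omega
  · -- R2
    intro z hz0 hz1
    by_cases hzv : z = v
    · rw [hp3 z hz0 hz1, if_pos hzv, hc3 u hu0 hu1, hc3 z hz0 hz1, hzv]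
      rw [if_neg hlab, if_pos rfl]
    · rw [hp3 z hz0 hz1, if_neg hzv]
      have hpz := hRp z hz0 hz1
      rw [hc3 _ hpz.1 hpz.2, hc3 z hz0 hz1, hR2 z hz0 hz1]
  · -- R3
    intro z w hz0 hz1 hw0 hw1 hrz hrw hcc
    have hz2 := (hroots3 z hz0 hz1).mp hrz
    have hw2 := (hroots3 w hw0 hw1).mp hrw
    rw [hc3 z hz0 hz1, hc3 w hw0 hw1] at hcc
    by_cases hcz : pg c z = lb
    · exact absurd (hR3 z v hz0 hz1 hv0 hv1 hz2.1 hrv hcz) hz2.2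
    · by_cases hcw : pg c w = lb
      · exact absurd (hR3 w v hw0 hw1 hv0 hv1 hw2.1 hrv hcw) hw2.2
      · rw [if_neg hcz, if_neg hcw] at hcc
        exact hR3 z w hz0 hz1 hw0 hw1 hz2.1 hw2.1 hcc
  · -- MA
    intro i hi0 hi1
    rw [hc3 i hi0 hi1]
    by_cases hci : pg c i = lb
    · rw [if_pos hci, hmem3 la hla0 hla1, if_neg hlab, if_pos rfl]
      refine List.mem_append_right _ ?_
      rw [← hci]
      exact hMA i hi0 hi1
    · rw [if_neg hci]
      have hcrng := hRc i hi0 hi1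
      rw [hmem3 _ hcrng.1 hcrng.2, if_neg hci]
      by_cases hca : pg c i = la
      · rw [if_pos hca]
        refine List.mem_append_left _ ?_
        rw [← hca]
        exact hMA i hi0 hi1
      · rw [if_neg hca]
        exact hMA i hi0 hi1
  · -- MB
    intro l hl0 hl1 x hx
    rw [hmem3 l hl0 hl1] at hx
    by_cases hlb' : l = lb
    · rw [if_pos hlb'] at hx; exact absurd hx (List.not_mem_nil)
    · rw [if_neg hlb'] at hx
      by_cases hla' : l = la
      · rw [if_pos hla'] at hx
        rcases List.mem_append.mp hx with hx1 | hx1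
        · have := hMB la hla0 hla1 x hx1
          refine ⟨this.1, ?_⟩
          rw [hc3 x this.1.1 this.1.2, this.2, if_neg hlab, hla']
        · have := hMB lb hlb0 hlb1 x hx1
          refine ⟨this.1, ?_⟩
          rw [hc3 x this.1.1 this.1.2, this.2, if_pos rfl, hla']
      · rw [if_neg hla'] at hx
        have := hMB l hl0 hl1 x hx
        refine ⟨this.1, ?_⟩
        rw [hc3 x this.1.1 this.1.2, this.2, if_neg hlb']
  · -- R4
    intro r hr0 hr1 hrr
    have hr2 := (hroots3 r hr0 hr1).mp hrr
    by_cases hrru : r = u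
    · subst hrru
      rw [hs3g r hr0 hr1, if_pos rfl, hc3 r hr0 hr1, if_neg hlab]
      rw [hmem3 la hla0 hla1, if_neg hlab, if_pos rfl]
      rw [hR4 r hr0 hr1 hru, hR4 v hv0 hv1 hrv]
      rw [← hla_def, ← hlb_def, List.length_append]
      push_cast
      ring
    · have hcra : pg c r ≠ la := fun he =>
        hrru (hR3 r u hr0 hr1 hu0 hu1 hr2.1 hru (by rw [he]))
      have hcrb : pg c r ≠ lb := fun he =>
        hr2.2 (hR3 r v hr0 hr1 hv0 hv1 hr2.1 hrv (by rw [he]))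
      rw [hs3g r hr0 hr1, if_neg hrru, hc3 r hr0 hr1, if_neg hcrb]
      have hcrng := hRc r hr0 hr1
      rw [hmem3 _ hcrng.1 hcrng.2, if_neg hcrb, if_neg hcra]
      exact hR4 r hr0 hr1 hr2.1

theorem step_spec (n F k : Nat) (p s c : List Int) (mem : List (List Int)) (q : Int × Int)
    (hInv : UFInv n k p s c mem) (hkF : k + 1 ≤ F)
    (hq1 : 1 - (n : Int) ≤ q.1) (hq2 : q.1 ≤ (n : Int)) (hq3 : 1 - (n : Int) ≤ q.2) (hq4 : q.2 ≤ (n : Int)) :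
    ∃ (p' s' c' : List Int) (mem' : List (List Int)) (v : Int),
      (∀ res : List Int, ufStep F ((p, s), res) q = ((p', s'), res ++ [v])) ∧
      (∀ res : List Int, altStep ((c, mem), res) q = ((c', mem'), res ++ [v])) ∧
      UFInv n (k + 1) p' s' c' mem' := by
  obtain ⟨hlp, hls, hlc, hlm, hRp, hRc, ⟨h, hH, hhb⟩, hR2, hR3, hMA, hMB, hR4⟩ := hInv
  have hn1 : 1 ≤ n := by omega
  obtain ⟨F', rfl⟩ : ∃ F', F = F' + 1 := ⟨F - 1, by omega⟩
  set F := F' + 1 with hF_def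
  set x0 := q.1 - 1 with hx0_def
  set y0 := q.2 - 1 with hy0_def
  set x := (if x0 < 0 then x0 + (n : Int) else x0) with hx_def
  set y := (if y0 < 0 then y0 + (n : Int) else y0) with hy_def
  have hx0 : 0 ≤ x := by rw [hx_def]; split_ifs <;> omega
  have hx1 : x < (n : Int) := by rw [hx_def]; split_ifs <;> omega
  have hy0 : 0 ≤ y := by rw [hy_def]; split_ifs <;> omega
  have hy1 : y < (n : Int) := by rw [hy_def]; split_ifs <;> omega
  have hwx : ∀ pp : List Int, pp.length = n → Rng n pp → ufFind pp x0 F = ufFind pp x F := by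
    intro pp hl hR
    by_cases hneg : x0 < 0
    · rw [hF_def, find_entry_wrap n F' pp x0 hl hR (by omega) hneg, hx_def, if_pos hneg]
    · rw [hx_def, if_neg hneg]
  have hwy : ∀ pp : List Int, pp.length = n → Rng n pp → ufFind pp y0 F = ufFind pp y F := by
    intro pp hl hR
    by_cases hneg : y0 < 0
    · rw [hF_def, find_entry_wrap n F' pp y0 hl hR (by omega) hneg, hy_def, if_pos hneg]
    · rw [hy_def, if_neg hneg]
  have hgw : ∀ cc : List Int, cc.length = n →
      PySem.List.pyGetD cc x0 0 = PySem.List.pyGetD cc x 0 := by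
    intro cc hl
    by_cases hneg : x0 < 0
    · rw [getD_wrap cc x0 0 (by rw [hl]; omega) hneg, hl, hx_def, if_pos hneg]
    · rw [hx_def, if_neg hneg]
  have hgwy : ∀ cc : List Int, cc.length = n →
      PySem.List.pyGetD cc y0 0 = PySem.List.pyGetD cc y 0 := by
    intro cc hl
    by_cases hneg : y0 < 0
    · rw [getD_wrap cc y0 0 (by rw [hl]; omega) hneg, hl, hy_def, if_pos hneg]
    · rw [hy_def, if_neg hneg]
  obtain ⟨l1, R1p, H1, R21, rxr, rxrt1, rxrtp, rxc, iff1⟩ :=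
    find_spec n c h F p x hlp hRp hH hR2 hx0 hx1 (le_trans (hhb x hx0 hx1) (by omega))
  set p1 := (ufFind p x F).1 with hp1_def
  set rx := (ufFind p x F).2 with hrx_def
  obtain ⟨l2, R2p, H2, R22, ryr, ryrt2, ryrtp, ryc, iff2⟩ :=
    find_spec n c h F p1 y l1 R1p H1 R21 hy0 hy1 (le_trans (hhb y hy0 hy1) (by omega))
  set p2 := (ufFind p1 y F).1 with hp2_def
  set ry := (ufFind p1 y F).2 with hry_def
  have hiff : ∀ z : Int, 0 ≤ z → z < n → (pg p2 z = z ↔ pg p z = z) := fun z h0 h1 =>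
    (iff2 z h0 h1).trans (iff1 z h0 h1)
  have hrx2 : pg p2 rx = rx := (iff2 rx rxr.1 rxr.2).mpr rxrt1
  have hrxp : pg p rx = rx := rxrtp
  have hryp : pg p ry = ry := (iff1 ry ryr.1 ryr.2).mp ryrtp
  have hR3' : R3 n p2 c := fun z w h0 h1 h2 h3 hz hw hc =>
    hR3 z w h0 h1 h2 h3 ((hiff z h0 h1).mp hz) ((hiff w h2 h3).mp hw) hc
  have hR4' : R4 n p2 s c mem := fun r h0 h1 hr => hR4 r h0 h1 ((hiff r h0 h1).mp hr)
  have hAstep : ∀ res : List Int, ufStep F ((p, s), res) q =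
      (((ufFind (ufUnion p s x0 y0 F).1 x0 F).1, (ufUnion p s x0 y0 F).2),
        res ++ [pg (ufUnion p s x0 y0 F).2 (ufFind (ufUnion p s x0 y0 F).1 x0 F).2]) :=
    fun res => rfl
  have hUU : ufUnion p s x0 y0 F = ufUnion p s x y F := by
    show (if (ufFind p x0 F).2 ≠ (ufFind (ufFind p x0 F).1 y0 F).2 then _ else _) = _
    rw [hwx p hlp hRp]
    have hl1 : (ufFind p x F).1.length = n := by rw [find_len]; exact hlp
    have hR1 : Rng n (ufFind p x F).1 := by
      obtain ⟨_, hRa, _⟩ := find_spec n c h F p x hlp hRp hH hR2 hx0 hx1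
        (le_trans (hhb x hx0 hx1) (by omega))
      exact hRa
    rw [hwy _ hl1 hR1]
    rfl
  by_cases hrr : rx = ry
  · -- same component: union is a no-op on the partition
    have hU : ufUnion p s x y F = (p2, s) := by
      show (if rx ≠ ry then _ else (p2, s)) = (p2, s)
      rw [if_neg (by simpa using hrr)]
    have hlab : pg c x = pg c y := by rw [← rxc, ← ryc, hrr]
    obtain ⟨l3, R3p, H3, R23, r3r, r3rt3, r3rtp, r3c, iff3⟩ :=
      find_spec n c h F p2 x l2 R2p H2 R22 hx0 hx1 (le_trans (hhb x hx0 hx1) (by omega))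
    refine ⟨(ufFind p2 x F).1, s, c, mem, pg s (ufFind p2 x F).2, ?_, ?_, ?_⟩
    · intro res
      rw [hAstep res, hUU, hU, hwx p2 l2 R2p]
    · intro res
      show altStep _ _ = _
      simp only [altStep, ← hx0_def, ← hy0_def]
      rw [hgw c hlc, hgwy c hlc]
      rw [if_neg (by simpa using hlab)]
      show ((c, mem), res ++
        [((PySem.List.pyGetD mem (PySem.List.pyGetD c x0 0) ([] : List Int)).length : Int)]) = _
      rw [hgw c hlc]
      have hout : ((PySem.List.pyGetD mem (PySem.List.pyGetD c x 0) ([] : List Int)).length : Int)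
          = pg s (ufFind p2 x F).2 := by
        rw [hR4' _ r3r.1 r3r.2 r3rtp, r3c]
        rfl
      rw [hout]
    · have hiff3 : ∀ z : Int, 0 ≤ z → z < n → (pg (ufFind p2 x F).1 z = z ↔ pg p z = z) :=
        fun z h0 h1 => (iff3 z h0 h1).trans (hiff z h0 h1)
      refine ⟨l3, hls, hlc, hlm, R3p, hRc, ⟨h, H3, fun z h0 h1 => le_trans (hhb z h0 h1) (by omega)⟩,
        R23, ?_, hMA, hMB, ?_⟩
      · exact fun z w h0 h1 h2 h3 hz hw hc =>
          hR3 z w h0 h1 h2 h3 ((hiff3 z h0 h1).mp hz) ((hiff3 w h2 h3).mp hw) hc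
      · exact fun r h0 h1 hr => hR4 r h0 h1 ((hiff3 r h0 h1).mp hr)
  · -- distinct components: merge
    have hlab : pg c x ≠ pg c y := by
      intro he
      exact hrr (hR3' rx ry rxr.1 rxr.2 ryr.1 ryr.2 hrx2 ryrt2 (by rw [rxc, ryc, he]))
    have hszx : pg s rx = ((mg mem (pg c x)).length : Int) := by
      rw [← rxc]; exact hR4 rx rxr.1 rxr.2 hrxp
    have hszy : pg s ry = ((mg mem (pg c y)).length : Int) := by
      rw [← ryc]; exact hR4 ry ryr.1 ryr.2 hryp
    have hcond : (pg s rx < pg s ry) ↔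
        ((mg mem (pg c x)).length < (mg mem (pg c y)).length) := by
      rw [hszx, hszy]; exact_mod_cast Iff.rfl
    by_cases hsw : pg s rx < pg s ry
    · -- ry wins: u = ry, v = rx; B keeps label pg c y
      have hMC := merge_core n k F p2 s c mem h ry rx l2 hls hlc hlm R2p hRc H2 hhb hkF
        R22 hR3' hMA hMB hR4' ryr.1 ryr.2 rxr.1 rxr.2 (fun he => hrr he.symm) ryrt2 hrx2
      rw [rxc, ryc] at hMC
      set c3 := (mg mem (pg c x)).foldl (fun cc t => PySem.List.pySetD cc t (pg c y)) c with hc3_def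
      set mem3 := PySem.List.pySetD
        (PySem.List.pySetD mem (pg c y) (mg mem (pg c y) ++ mg mem (pg c x)))
        (pg c x) ([] : List Int) with hmem3_def
      set p3 := PySem.List.pySetD p2 rx ry with hp3_def
      set s3 := PySem.List.pySetD s ry (pg s ry + pg s rx) with hs3_def
      have hU : ufUnion p s x y F = (p3, s3) := by
        show (if rx ≠ ry then _ else (p2, s)) = _
        rw [if_pos (by simpa using hrr)]
        have hpq : (if PySem.List.pyGetD s (ufFind p x F).2 0 <
            PySem.List.pyGetD s (ufFind (ufFind p x F).1 y F).2 0 then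
            ((ufFind (ufFind p x F).1 y F).2, (ufFind p x F).2)
            else ((ufFind p x F).2, (ufFind (ufFind p x F).1 y F).2)) = (ry, rx) :=
          if_pos hsw
        rw [hpq]
        rfl
      obtain ⟨l3p, l3s, l3c, l3m, R3p, R3c, ⟨h', H3, hb3⟩, R23, R33, MA3, MB3, R43⟩ := hMC
      obtain ⟨l4, R4p, H4, R24, r3r, r3rt4, r3rtp, r3c, iff4⟩ :=
        find_spec n c3 h' F p3 x l3p R3p H3 R23 hx0 hx1 (le_trans (hb3 x hx0 hx1) hkF)
      refine ⟨(ufFind p3 x F).1, s3, c3, mem3, pg s3 (ufFind p3 x F).2, ?_, ?_, ?_⟩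
      · intro res
        rw [hAstep res, hUU, hU, hwx p3 l3p R3p]
      · intro res
        show altStep _ _ = _
        simp only [altStep, ← hx0_def, ← hy0_def]
        rw [hgw c hlc, hgwy c hlc]
        rw [if_pos (by simpa using hlab)]
        have hll : (if (PySem.List.pyGetD mem (PySem.List.pyGetD c x 0) ([] : List Int)).length <
            (PySem.List.pyGetD mem (PySem.List.pyGetD c y 0) ([] : List Int)).length then
            (PySem.List.pyGetD c y 0, PySem.List.pyGetD c x 0)
            else (PySem.List.pyGetD c x 0, PySem.List.pyGetD c y 0)) = (pg c y, pg c x) :=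
          if_pos (hcond.mp hsw)
        rw [hll]
        show ((c3, mem3), res ++
          [((PySem.List.pyGetD mem3 (PySem.List.pyGetD c3 x0 0) ([] : List Int)).length : Int)]) = _
        rw [hgw c3 l3c]
        have hout : ((PySem.List.pyGetD mem3 (PySem.List.pyGetD c3 x 0) ([] : List Int)).length : Int)
            = pg s3 (ufFind p3 x F).2 := by
          rw [R43 _ r3r.1 r3r.2 r3rtp, r3c]
          rfl
        rw [hout]
      · have hiff4 : ∀ z : Int, 0 ≤ z → z < n → (pg (ufFind p3 x F).1 z = z ↔ pg p3 z = z) := iff4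
        refine ⟨l4, l3s, l3c, l3m, R4p, R3c, ⟨h', H4, hb3⟩, R24, ?_, MA3, MB3, ?_⟩
        · exact fun z w h0 h1 h2 h3 hz hw hc =>
            R33 z w h0 h1 h2 h3 ((hiff4 z h0 h1).mp hz) ((hiff4 w h2 h3).mp hw) hc
        · exact fun r h0 h1 hr => R43 r h0 h1 ((hiff4 r h0 h1).mp hr)
    · -- rx wins: u = rx, v = ry; B keeps label pg c x
      have hMC := merge_core n k F p2 s c mem h rx ry l2 hls hlc hlm R2p hRc H2 hhb hkF
        R22 hR3' hMA hMB hR4' rxr.1 rxr.2 ryr.1 ryr.2 hrr hrx2 ryrt2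
      rw [rxc, ryc] at hMC
      set c3 := (mg mem (pg c y)).foldl (fun cc t => PySem.List.pySetD cc t (pg c x)) c with hc3_def
      set mem3 := PySem.List.pySetD
        (PySem.List.pySetD mem (pg c x) (mg mem (pg c x) ++ mg mem (pg c y)))
        (pg c y) ([] : List Int) with hmem3_def
      set p3 := PySem.List.pySetD p2 ry rx with hp3_def
      set s3 := PySem.List.pySetD s rx (pg s rx + pg s ry) with hs3_def
      have hU : ufUnion p s x y F = (p3, s3) := by
        show (if rx ≠ ry then _ else (p2, s)) = _
        rw [if_pos (by simpa using hrr)]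
        have hpq : (if PySem.List.pyGetD s (ufFind p x F).2 0 <
            PySem.List.pyGetD s (ufFind (ufFind p x F).1 y F).2 0 then
            ((ufFind (ufFind p x F).1 y F).2, (ufFind p x F).2)
            else ((ufFind p x F).2, (ufFind (ufFind p x F).1 y F).2)) = (rx, ry) :=
          if_neg hsw
        rw [hpq]
        rfl
      obtain ⟨l3p, l3s, l3c, l3m, R3p, R3c, ⟨h', H3, hb3⟩, R23, R33, MA3, MB3, R43⟩ := hMC
      obtain ⟨l4, R4p, H4, R24, r3r, r3rt4, r3rtp, r3c, iff4⟩ :=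
        find_spec n c3 h' F p3 x l3p R3p H3 R23 hx0 hx1 (le_trans (hb3 x hx0 hx1) hkF)
      refine ⟨(ufFind p3 x F).1, s3, c3, mem3, pg s3 (ufFind p3 x F).2, ?_, ?_, ?_⟩
      · intro res
        rw [hAstep res, hUU, hU, hwx p3 l3p R3p]
      · intro res
        show altStep _ _ = _
        simp only [altStep, ← hx0_def, ← hy0_def]
        rw [hgw c hlc, hgwy c hlc]
        rw [if_pos (by simpa using hlab)]
        have hll : (if (PySem.List.pyGetD mem (PySem.List.pyGetD c x 0) ([] : List Int)).length <
            (PySem.List.pyGetD mem (PySem.List.pyGetD c y 0) ([] : List Int)).length then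
            (PySem.List.pyGetD c y 0, PySem.List.pyGetD c x 0)
            else (PySem.List.pyGetD c x 0, PySem.List.pyGetD c y 0)) = (pg c x, pg c y) :=
          if_neg (fun hc => hsw (hcond.mpr hc))
        rw [hll]
        show ((c3, mem3), res ++
          [((PySem.List.pyGetD mem3 (PySem.List.pyGetD c3 x0 0) ([] : List Int)).length : Int)]) = _
        rw [hgw c3 l3c]
        have hout : ((PySem.List.pyGetD mem3 (PySem.List.pyGetD c3 x 0) ([] : List Int)).length : Int)
            = pg s3 (ufFind p3 x F).2 := by
          rw [R43 _ r3r.1 r3r.2 r3rtp, r3c]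
          rfl
        rw [hout]
      · have hiff4 : ∀ z : Int, 0 ≤ z → z < n → (pg (ufFind p3 x F).1 z = z ↔ pg p3 z = z) := iff4
        refine ⟨l4, l3s, l3c, l3m, R4p, R3c, ⟨h', H4, hb3⟩, R24, ?_, MA3, MB3, ?_⟩
        · exact fun z w h0 h1 h2 h3 hz hw hc =>
            R33 z w h0 h1 h2 h3 ((hiff4 z h0 h1).mp hz) ((hiff4 w h2 h3).mp hw) hc
        · exact fun r h0 h1 hr => R43 r h0 h1 ((hiff4 r h0 h1).mp hr)

theorem loop_spec (n F : Nat) :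
    ∀ (qs : List (Int × Int)) (k : Nat) (p s c : List Int) (mem : List (List Int)) (res : List Int),
    UFInv n k p s c mem → k + qs.length ≤ F →
    (∀ q ∈ qs, 1 - (n : Int) ≤ q.1 ∧ q.1 ≤ (n : Int) ∧ 1 - (n : Int) ≤ q.2 ∧ q.2 ≤ (n : Int)) →
    (qs.foldl (ufStep F) ((p, s), res)).2 = (qs.foldl altStep ((c, mem), res)).2 := by
  intro qs
  induction qs with
  | nil => intro k p s c mem res _ _ _; rfl
  | cons q qs ih =>
    intro k p s c mem res hInv hF hPre
    have hq := hPre q (List.mem_cons_self ..)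
    obtain ⟨p', s', c', mem', v, hA, hB, hInv'⟩ :=
      step_spec n F k p s c mem q hInv (by simp at hF; omega) hq.1 hq.2.1 hq.2.2.1 hq.2.2.2
    rw [List.foldl_cons, List.foldl_cons, hA res, hB res]
    exact ih (k + 1) p' s' c' mem' (res ++ [v]) hInv' (by simp at hF ⊢; omega)
      (fun q' hq' => hPre q' (List.mem_cons_of_mem _ hq'))

theorem init_inv (n : Nat) :
    UFInv n 0 (PySem.List.pyRange 0 (n : Int) 1) (List.replicate n 1)
      (PySem.List.pyRange 0 (n : Int) 1)
      ((PySem.List.pyRange 0 (n : Int) 1).map (fun i => [i])) := by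
  have hlr : (PySem.List.pyRange 0 (n : Int) 1).length = n := by
    rw [PySem.List.length_pyRange_one]; omega
  have hpr : ∀ x : Int, 0 ≤ x → x < n → pg (PySem.List.pyRange 0 (n : Int) 1) x = x := by
    intro x h0 h1
    rw [pg, PySem.List.pyGetD_eq_getElem _ _ h0 (by rw [hlr]; exact h1),
      PySem.List.getElem_pyRange_one]
    omega
  have hsr : ∀ x : Int, 0 ≤ x → x < n → pg (List.replicate n (1 : Int)) x = 1 := by
    intro x h0 h1
    rw [pg, PySem.List.pyGetD_eq_getElem _ _ h0 (by simpa using h1)]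
    exact List.getElem_replicate _
  have hmr : ∀ l : Int, 0 ≤ l → l < n →
      mg ((PySem.List.pyRange 0 (n : Int) 1).map (fun i => [i])) l = [l] := by
    intro l h0 h1
    exact PySem.List.pyGetD_map_pyRange_of_nonneg (fun i => [i]) (n : Int) l _ h0 h1
  refine ⟨hlr, List.length_replicate, hlr, by simp [hlr], ?_, ?_, ?_, ?_, ?_, ?_, ?_, ?_⟩
  · intro x h0 h1; rw [hpr x h0 h1]; exact ⟨h0, h1⟩
  · intro x h0 h1; rw [hpr x h0 h1]; exact ⟨h0, h1⟩
  · refine ⟨fun _ => 0, ?_, fun x _ _ => le_refl 0⟩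
    intro x h0 h1
    rw [hpr x h0 h1]
    exact ⟨fun _ => rfl, fun hne => absurd rfl hne⟩
  · intro x h0 h1; rw [hpr x h0 h1]; exact hpr x h0 h1
  · intro x y h0 h1 h2 h3 _ _ hc
    rwa [hpr x h0 h1, hpr y h2 h3] at hc
  · intro i h0 h1
    rw [hpr i h0 h1, hmr i h0 h1]
    exact List.mem_singleton.mpr rfl
  · intro l h0 h1 x hx
    rw [hmr l h0 h1] at hx
    have := List.mem_singleton.mp hx
    subst this
    exact ⟨⟨h0, h1⟩, hpr x h0 h1⟩
  · intro r h0 h1 _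
    rw [hsr r h0 h1, hpr r h0 h1, hmr r h0 h1]
    rfl

-- ===== VERDICT (by name: the statement is the Claim_ definition above) =====
theorem friendCircleSize_spec : Claim_equal_friendCircleSize := by
  unfold Claim_equal_friendCircleSize
  intro N queries hDom hPre
  unfold Spec_friendCircleSize friendCircleSize friendCircleSize_alt
  rcases queries with _ | ⟨q, qs⟩
  · rfl
  · have hq := hPre q (List.mem_cons_self ..)
    have hN : 1 ≤ N := by omega
    have hNn : ((N.toNat : Int)) = N := by omega
    rw [← hNn]
    exact loop_spec N.toNat (N.toNat + (q :: qs).length) (q :: qs) 0 _ _ _ _ []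
      (init_inv N.toNat) (by omega) (fun q' hq' => by rw [hNn]; exact hPre q' hq')
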